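-- pv_equiv track=rewrite | github.com/melonJe/stock | stock/korea_investment/utils.py | find_nth_open_day
-- ===== SOURCE A (Python) =====
-- def find_nth_open_day(holiday_data, nth_day: int) -> str:
--     """오늘을 제외한 nth 개장일을 찾습니다."""
--     open_days_found = 0
--     for key, value in holiday_data.items():  # holiday_data should be a dictionary
--         if value.get("opnd_yn") == "Y":  # Ensure the key exists and check its value
--             if open_days_found == nth_day:
--                 return key
--             open_days_found += 1
--     return ''
-- ===== SOURCE B (Python) =====
-- def find_nth_open_day(holiday_data, nth_day: int) -> str:
--     """오늘을 제외한 nth 개장일을 찾습니다."""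
--     # Build the key list and a prefix-count array of open days, then binary-search
--     # for the first position whose prefix count reaches nth_day + 1.
--     keys = []
--     prefix = [0]
--     for key, value in holiday_data.items():
--         keys.append(key)
--         prefix.append(prefix[-1] + (1 if value.get("opnd_yn") == "Y" else 0))
--     if nth_day < 0 or nth_day >= prefix[-1]:
--         return ''
--     lo, hi = 0, len(keys)
--     while lo < hi:
--         mid = (lo + hi) // 2
--         if prefix[mid + 1] >= nth_day + 1:
--             hi = mid
--         else:
--             lo = mid + 1
--     return keys[lo]
-- ===== Notes on version B (the rewrite author's own statement) =====
-- stated objective: alternative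
-- what changed: B replaces A's single counting scan with early return by a staged algorithm: one pass builds a prefix-count array of open days alongside the key list, then a hand-written binary search on that monotone array finds the first position whose count reaches nth_day + 1.
import Mathlib
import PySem

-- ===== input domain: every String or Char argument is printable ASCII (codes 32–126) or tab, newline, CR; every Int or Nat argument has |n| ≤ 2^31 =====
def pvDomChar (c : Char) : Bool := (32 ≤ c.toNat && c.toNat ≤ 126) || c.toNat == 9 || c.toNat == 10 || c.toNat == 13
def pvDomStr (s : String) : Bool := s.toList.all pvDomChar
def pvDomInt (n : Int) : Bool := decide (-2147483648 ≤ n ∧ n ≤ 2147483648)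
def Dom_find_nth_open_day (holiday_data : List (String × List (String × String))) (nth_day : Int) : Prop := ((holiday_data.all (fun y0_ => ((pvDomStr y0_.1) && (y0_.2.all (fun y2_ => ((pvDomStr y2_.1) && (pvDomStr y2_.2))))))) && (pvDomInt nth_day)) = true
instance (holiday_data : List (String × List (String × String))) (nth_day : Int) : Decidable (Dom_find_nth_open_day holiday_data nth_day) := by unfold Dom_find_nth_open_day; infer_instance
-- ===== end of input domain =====

-- B replaces A's single counting scan with early exit by a staged algorithm:
-- one pass builds a prefix-count array of open days, then a hand-written binary
-- search on that monotone array locates the nth open key (objective: alternative).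

-- ===== PORT A =====
-- the for-loop of A: carries the running counter open_days_found
def pvLoopA : List (String × List (String × String)) → Int → Int → String
  | [], _, _ => ""
  | (key, value) :: rest, found, nth_day =>
    if PySem.Dict.get? (PySem.Dict.mk value) "opnd_yn" == some "Y" then
      if found == nth_day then key
      else pvLoopA rest (found + 1) nth_day
    else pvLoopA rest found nth_day

def find_nth_open_day (holiday_data : List (String × List (String × String))) (nth_day : Int) : String :=
  pvLoopA holiday_data 0 nth_day

-- ===== PORT B =====
-- Source B's building loop: state (keys, prefix), appending key and prefix[-1] + flag
def pvBuildB (l : List (String × List (String × String))) : List String × List Int :=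
  l.foldl
    (fun st kv =>
      (st.1 ++ [kv.1],
       st.2 ++ [(PySem.List.pyGet? st.2 (-1)).getD 0 +
                  (if PySem.Dict.get? (PySem.Dict.mk kv.2) "opnd_yn" == some "Y" then 1 else 0)]))
    ([], [0])

-- Source B's while-loop; lo, hi stay non-negative in Python, so Nat with (lo+hi)/2 is exact
def pvBisectB (pre : List Int) (target : Int) (lo hi : Nat) : Nat :=
  if lo < hi then
    if target ≤ (PySem.List.pyGet? pre (((lo + hi) / 2 : Nat) + 1)).getD 0 then
      pvBisectB pre target lo ((lo + hi) / 2)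
    else
      pvBisectB pre target ((lo + hi) / 2 + 1) hi
  else lo
termination_by hi - lo
decreasing_by all_goals omega

def find_nth_open_day_alt (holiday_data : List (String × List (String × String))) (nth_day : Int) : String :=
  let kp := pvBuildB holiday_data
  if nth_day < 0 ∨ (PySem.List.pyGet? kp.2 (-1)).getD 0 ≤ nth_day then ""
  else (PySem.List.pyGet? kp.1 ((pvBisectB kp.2 (nth_day + 1) 0 kp.1.length : Nat) : Int)).getD ""

-- ===== PRECONDITION & SPEC =====
def Spec_find_nth_open_day (holiday_data : List (String × List (String × String))) (nth_day : Int) (out : String) : Prop := out = find_nth_open_day_alt holiday_data nth_day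
instance (holiday_data : List (String × List (String × String))) (nth_day : Int) (out : String) : Decidable (Spec_find_nth_open_day holiday_data nth_day out) := by unfold Spec_find_nth_open_day; infer_instance

-- ===== CLAIM (what is proved, stated in full; the proofs are below) =====
def Claim_equal_find_nth_open_day : Prop := ∀ (holiday_data : List (String × List (String × String))) (nth_day : Int), Dom_find_nth_open_day holiday_data nth_day → Spec_find_nth_open_day holiday_data nth_day (find_nth_open_day holiday_data nth_day)

-- ===== LEMMAS AND PROOFS =====

-- the open-day test both programs apply to a value
def pvOpen (kv : String × List (String × String)) : Bool :=
  PySem.Dict.get? (PySem.Dict.mk kv.2) "opnd_yn" == some "Y"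

-- number of open days among the first i items
def pvCnt (l : List (String × List (String × String))) (i : Nat) : Nat :=
  ((l.take i).filter pvOpen).length

-- safe indexing with the bounds check, as A's result turns out to be
def pvGetOrEmpty (ks : List String) (i : Int) : String :=
  if 0 ≤ i ∧ i < (ks.length : Int) then (PySem.List.pyGet? ks i).getD "" else ""

lemma pvGetOrEmpty_nil (i : Int) : pvGetOrEmpty [] i = "" := by
  simp [pvGetOrEmpty]

lemma pvGetOrEmpty_cons (x : String) (xs : List String) (i : Int) :
    pvGetOrEmpty (x :: xs) i = if i = 0 then x else pvGetOrEmpty xs (i - 1) := by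
  by_cases h0 : i = 0
  · subst h0; simp [pvGetOrEmpty]
  · simp only [if_neg h0]
    unfold pvGetOrEmpty
    by_cases hneg : i < 0
    · rw [if_neg (by simp only [List.length_cons]; push_cast; omega), if_neg (by omega)]
    · have hi : 0 ≤ i - 1 := by omega
      by_cases hlt : i - 1 < (xs.length : Int)
      · rw [if_pos ⟨by omega, by simp only [List.length_cons]; push_cast; omega⟩, if_pos ⟨hi, hlt⟩]
        rw [PySem.List.pyGet?_of_nonneg (x :: xs) (by omega), PySem.List.pyGet?_of_nonneg xs hi]
        have ht : i.toNat = (i - 1).toNat + 1 := by omega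
        rw [ht, List.getElem?_cons_succ]
      · rw [if_neg (by simp only [List.length_cons]; push_cast; omega), if_neg (by omega)]

-- A's loop is: index n - c into the list of open keys, empty string out of range
lemma pvLoopA_eq (l : List (String × List (String × String))) :
    ∀ c n : Int,
      pvLoopA l c n = pvGetOrEmpty ((l.filter pvOpen).map Prod.fst) (n - c) := by
  induction l with
  | nil => intro c n; simp [pvLoopA, pvGetOrEmpty_nil]
  | cons kv rest ih =>
    intro c n
    obtain ⟨key, value⟩ := kv
    by_cases hopen : pvOpen (key, value) = true
    · simp only [pvLoopA, pvOpen] at hopen ⊢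
      simp only [hopen, if_true, List.filter_cons, pvOpen, List.map_cons]
      rw [pvGetOrEmpty_cons]
      by_cases heq : c = n
      · subst heq; simp
      · have hbeq : (c == n) = false := by simp [heq]
        rw [hbeq]
        simp only [Bool.false_eq_true, if_false, if_neg (by omega : ¬ (n - c = 0))]
        rw [ih (c + 1) n]
        congr 1; omega
    · simp only [pvOpen] at hopen
      simp only [pvLoopA, List.filter_cons, pvOpen]
      rw [if_neg (by simp [hopen]), if_neg (by simp [hopen])]
      exact ih c n

-- B's building loop produces the key list and the prefix-count array
lemma pvBuildB_eq (l : List (String × List (String × String))) :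
    pvBuildB l = (l.map Prod.fst,
      (List.range (l.length + 1)).map (fun i => (pvCnt l i : Int))) := by
  induction l using List.reverseRecOn with
  | nil => simp [pvBuildB, pvCnt, List.range_succ]
  | append_singleton l x ih =>
    unfold pvBuildB at ih ⊢
    rw [List.foldl_append, ih]
    simp only [List.foldl_cons, List.foldl_nil, Prod.mk.injEq]
    constructor
    · simp
    · have hlen2 : (l ++ [x]).length = l.length + 1 := by simp
      rw [hlen2, List.range_succ (n := l.length + 1)]
      have hlast : (List.range (l.length + 1)).map (fun i => (pvCnt l i : Int))
          = (List.range l.length).map (fun i => (pvCnt l i : Int)) ++ [(pvCnt l l.length : Int)] := by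
        rw [List.range_succ, List.map_append]; simp
      rw [hlast, PySem.List.pyGet?_neg_one_append_singleton]
      simp only [Option.getD_some, List.map_append]
      congr 1
      · rw [← hlast]
        apply List.map_congr_left
        intro i hi
        have hi' : i ≤ l.length := by simpa [Nat.lt_succ_iff] using List.mem_range.mp hi
        simp [pvCnt, List.take_append_of_le_length hi']
      · simp only [List.map_cons, List.map_nil, List.cons.injEq, and_true]
        have h1 : pvCnt (l ++ [x]) (l.length + 1) =
            pvCnt l l.length + (if pvOpen x then 1 else 0) := by
          simp only [pvCnt, List.take_of_length_le (by simp : (l ++ [x]).length ≤ l.length + 1),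
            List.take_of_length_le (le_refl l.length), List.filter_append]
          by_cases h : pvOpen x = true <;> simp [h]
        rw [h1]; push_cast
        by_cases h : pvOpen x = true <;> simp [pvOpen]

lemma pvGetD_succ (P : List Int) (m : Nat) :
    (PySem.List.pyGet? P ((m : Nat) + 1)).getD 0 = P.getD (m + 1) 0 := by
  have h : (((m : Nat) : Int) + 1) = (((m + 1 : Nat) : Nat) : Int) := by push_cast; ring
  rw [h, PySem.List.pyGet?_natCast, List.getD_eq_getElem?_getD]

-- B's binary search returns the least index whose prefix count reaches the target
lemma pvBisectB_eq (P : List Int) (t : Int) (N i0 : Nat)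
    (hmin : ∀ j, j < i0 → ¬ t ≤ P.getD (j + 1) 0)
    (hmono : ∀ j, i0 ≤ j → j < N → t ≤ P.getD (j + 1) 0) :
    ∀ k lo hi, hi - lo ≤ k → lo ≤ i0 → i0 ≤ hi → hi ≤ N → pvBisectB P t lo hi = i0 := by
  intro k
  induction k with
  | zero =>
    intro lo hi h1 h2 h3 h4
    unfold pvBisectB; rw [if_neg (by omega)]; omega
  | succ k ih =>
    intro lo hi h1 h2 h3 h4
    by_cases hlh : lo < hi
    · unfold pvBisectB
      rw [if_pos hlh, pvGetD_succ]
      by_cases hc : t ≤ P.getD ((lo + hi) / 2 + 1) 0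
      · rw [if_pos hc]
        have hle : i0 ≤ (lo + hi) / 2 := by
          by_contra h; push Not at h
          exact hmin _ (by omega) hc
        exact ih lo ((lo + hi) / 2) (by omega) h2 hle (by omega)
      · rw [if_neg hc]
        have hgt : (lo + hi) / 2 < i0 := by
          by_contra h; push Not at h
          exact hc (hmono _ h (by omega))
        exact ih ((lo + hi) / 2 + 1) hi (by omega) (by omega) h3 h4
    · unfold pvBisectB; rw [if_neg hlh]; omega

lemma pvCnt_mono (l : List (String × List (String × String))) {i j : Nat} (h : i ≤ j) :
    pvCnt l i ≤ pvCnt l j := by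
  unfold pvCnt
  have hs : List.Sublist (l.take i) (l.take j) := by
    have := List.take_sublist i (l.take j)
    rwa [List.take_take, Nat.min_eq_left h] at this
  exact (hs.filter pvOpen).length_le

lemma pvCnt_succ (l : List (String × List (String × String))) {i : Nat} (h : i < l.length) :
    pvCnt l (i + 1) = pvCnt l i + (if pvOpen l[i] then 1 else 0) := by
  unfold pvCnt
  rw [List.take_add_one, List.getElem?_eq_getElem h]
  simp only [Option.toList_some, List.filter_append, List.length_append]
  by_cases hx : pvOpen l[i] = true <;> simp [hx]

lemma pvPrefix_getD (l : List (String × List (String × String))) (k : Nat) (h : k ≤ l.length) :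
    ((List.range (l.length + 1)).map (fun i => (pvCnt l i : Int))).getD k 0 = (pvCnt l k : Int) := by
  rw [List.getD_eq_getElem?_getD, List.getElem?_map, List.getElem?_range (by omega)]
  rfl

lemma pvPrefix_last (l : List (String × List (String × String))) :
    (PySem.List.pyGet? ((List.range (l.length + 1)).map (fun i => (pvCnt l i : Int))) (-1)).getD 0
      = (pvCnt l l.length : Int) := by
  rw [List.range_succ, List.map_append]
  simp [PySem.List.pyGet?_neg_one_append_singleton]

-- ===== VERDICT (by name: the statement is the Claim_ definition above) =====
theorem find_nth_open_day_spec : Claim_equal_find_nth_open_day := by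
  intro l n _
  unfold Spec_find_nth_open_day find_nth_open_day find_nth_open_day_alt
  rw [pvLoopA_eq, pvBuildB_eq]
  simp only [pvPrefix_last, sub_zero]
  by_cases hguard : n < 0 ∨ (pvCnt l l.length : Int) ≤ n
  · rw [if_pos hguard]
    unfold pvGetOrEmpty
    rw [if_neg (by
      simp only [List.length_map]
      have : (l.filter pvOpen).length = pvCnt l l.length := by
        unfold pvCnt; rw [List.take_length]
      omega)]
  · rw [if_neg hguard]
    push Not at hguard
    obtain ⟨hn0, hnlt⟩ := hguard
    set N := l.length with hN
    have hNpos : 0 < N := by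
      by_contra h
      have : N = 0 := by omega
      rw [this] at hnlt
      simp [pvCnt] at hnlt; omega
    set nt := n.toNat with hnt
    have hcntN : nt + 1 ≤ pvCnt l N := by omega
    have hex : ∃ i, nt + 1 ≤ pvCnt l (i + 1) := ⟨N - 1, by
      have : N - 1 + 1 = N := by omega
      rw [this]; exact hcntN⟩
    set i0 := Nat.find hex with hi0def
    have hQ : nt + 1 ≤ pvCnt l (i0 + 1) := Nat.find_spec hex
    have hi0N : i0 < N := by
      have := Nat.find_min' hex (m := N - 1) (by
        have : N - 1 + 1 = N := by omega
        rw [this]; exact hcntN)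
      omega
    have hlow : pvCnt l i0 ≤ nt := by
      rcases Nat.eq_zero_or_pos i0 with h0 | hpos
      · rw [h0]; simp [pvCnt]
      · have := Nat.find_min hex (m := i0 - 1) (by omega)
        have he : i0 - 1 + 1 = i0 := by omega
        rw [he] at this; omega
    have hopen : pvOpen l[i0] = true := by
      by_contra hc
      have := pvCnt_succ l hi0N
      rw [if_neg hc] at this; omega
    have hcnt_eq : pvCnt l i0 = nt := by
      have := pvCnt_succ l hi0N
      rw [if_pos hopen] at this; omega
    -- run the binary search
    have hlen_map : (l.map Prod.fst).length = N := by simp [hN]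
    rw [hlen_map]
    rw [pvBisectB_eq _ _ N i0
      (by
        intro j hj
        rw [pvPrefix_getD l (j + 1) (by omega)]
        have := Nat.find_min hex (m := j) hj
        omega)
      (by
        intro j hij hjN
        rw [pvPrefix_getD l (j + 1) (by omega)]
        have := pvCnt_mono l (show i0 + 1 ≤ j + 1 by omega)
        omega)
      N 0 N (by omega) (by omega) (by omega) (by omega)]
    -- both sides are the key at position i0
    have hsplit : l.filter pvOpen
        = (l.take i0).filter pvOpen ++ l[i0] :: (l.drop (i0 + 1)).filter pvOpen := by
      conv_lhs => rw [← List.take_append_drop i0 l]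
      rw [List.filter_append, List.drop_eq_getElem_cons hi0N, List.filter_cons, if_pos hopen]
    have hprelen : (((l.take i0).filter pvOpen).map Prod.fst).length = nt := by
      simp only [List.length_map]
      exact hcnt_eq
    unfold pvGetOrEmpty
    rw [if_pos (by
      constructor
      · exact hn0
      · simp only [List.length_map]
        have : (l.filter pvOpen).length = pvCnt l N := by
          unfold pvCnt; rw [hN, List.take_length]
        omega)]
    have hnn : n = ((nt : Nat) : Int) := by omega
    rw [hnn, hsplit, List.map_append, List.map_cons, ← hprelen,
      PySem.List.pyGet?_append_length, PySem.List.pyGet?_natCast]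
    simp [List.getElem?_map, List.getElem?_eq_getElem hi0N]
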